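-- pv_equiv track=rewrite | github.com/maximizeschneider/qap-vns | Neighborhood.py | _is_valid_combination
-- ===== SOURCE A (Python) =====
-- def _is_valid_combination(combination: tuple[tuple[int, int], ...]) -> bool:
--     """Invalid if adjacent or same insertions."""
--     seen_pairs = set()
--     for i, j in combination:
--         # check for reverse insertions (i,j) and (j,i)
--         if (j, i) in seen_pairs:
--             return False
--         # check for adjacent insertions (i,j) and (i,j+1) or (i,j-1) that already in seen_pairs
--         if (i, j) in seen_pairs:
--             if i == j - 1 or i == j + 1:
--                 return False
--         seen_pairs.add((i, j))
--
--     return True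
-- ===== SOURCE B (Python) =====
-- def _is_valid_combination(combination):
--     counts = {}
--     for i, j in combination:
--         counts[(i, j)] = counts.get((i, j), 0) + 1
--     for (i, j), c in counts.items():
--         if i != j and (j, i) in counts:
--             return False
--         if c >= 2 and (i == j or abs(i - j) == 1):
--             return False
--     return True
-- ===== Notes on version B (the rewrite author's own statement) =====
-- stated objective: alternative
-- what changed: Replaces A's incremental running-seen-set single pass with early exit by a two-phase formulation: build a pair-count table once, then scan the distinct pairs for an existence-based violation (a reversed pair with i!=j, or a repeated pair that is diagonal or adjacent).
import Mathlib
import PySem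

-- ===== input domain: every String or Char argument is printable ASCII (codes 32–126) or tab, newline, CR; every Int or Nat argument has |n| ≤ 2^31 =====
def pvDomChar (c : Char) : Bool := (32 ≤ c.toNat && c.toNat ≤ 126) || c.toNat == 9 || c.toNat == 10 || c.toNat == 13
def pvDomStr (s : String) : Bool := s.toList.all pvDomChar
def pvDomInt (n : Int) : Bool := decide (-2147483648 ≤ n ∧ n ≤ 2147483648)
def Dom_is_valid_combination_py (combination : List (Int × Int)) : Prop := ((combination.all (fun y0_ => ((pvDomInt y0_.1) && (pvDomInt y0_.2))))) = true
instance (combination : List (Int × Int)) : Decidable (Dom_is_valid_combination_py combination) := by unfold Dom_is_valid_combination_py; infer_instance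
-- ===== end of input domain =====

-- B replaces A's incremental seen-set pass (early exit) by "build a pair-count table once,
-- then scan the distinct pairs for a violating pair" — an alternative decomposition, not faster.

-- ===== PORT A =====
def pvAValidAux (comb : List (Int × Int)) (seen : PySem.Set (Int × Int)) : Bool :=
  match comb with
  | [] => true
  | (i, j) :: rest =>
    if PySem.Set.contains seen (j, i) = true then false
    else if PySem.Set.contains seen (i, j) = true then
      (if i = j - 1 ∨ i = j + 1 then false
       else pvAValidAux rest (PySem.Set.add seen (i, j)))
    else pvAValidAux rest (PySem.Set.add seen (i, j))

def is_valid_combination_py (combination : List (Int × Int)) : Bool :=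
  pvAValidAux combination PySem.Set.empty

-- ===== PORT B =====
def pvBScan (counts : PySem.Dict (Int × Int) Int) (items : List ((Int × Int) × Int)) : Bool :=
  match items with
  | [] => true
  | ((i, j), c) :: rest =>
    if i ≠ j ∧ counts.contains (j, i) = true then false
    else if 2 ≤ c ∧ (i = j ∨ (i - j).natAbs = 1) then false
    else pvBScan counts rest

def is_valid_combination_py_alt (combination : List (Int × Int)) : Bool :=
  let counts := combination.foldl (fun d p => d.insert p (d.getD p 0 + 1)) PySem.Dict.empty
  pvBScan counts counts.items

-- ===== PRECONDITION & SPEC =====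
def Spec_is_valid_combination_py (combination : List (Int × Int)) (out : Bool) : Prop := out = is_valid_combination_py_alt combination
instance (combination : List (Int × Int)) (out : Bool) : Decidable (Spec_is_valid_combination_py combination out) := by unfold Spec_is_valid_combination_py; infer_instance

-- ===== CLAIM (what is proved, stated in full; the proofs are below) =====
def Claim_equal_is_valid_combination_py : Prop := ∀ (combination : List (Int × Int)), Dom_is_valid_combination_py combination → Spec_is_valid_combination_py combination (is_valid_combination_py combination)

-- ===== LEMMAS AND PROOFS =====

-- The common characterisation of "invalid": some pair is violating —
-- a reversed partner exists (for an off-diagonal pair), or the pair repeats and is diagonal or adjacent.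
def Viol (comb : List (Int × Int)) : Prop :=
  ∃ p ∈ comb, (p.1 ≠ p.2 ∧ (p.2, p.1) ∈ comb) ∨
    (2 ≤ comb.count p ∧ (p.1 = p.2 ∨ p.1 = p.2 - 1 ∨ p.1 = p.2 + 1))

-- What A's loop detects when started with `seen` holding exactly the elements of L.
def ViolFrom (L comb : List (Int × Int)) : Prop :=
  ∃ l p r, comb = l ++ p :: r ∧
    ((p.2, p.1) ∈ L ++ l ∨ ((p.1, p.2) ∈ L ++ l ∧ (p.1 = p.2 - 1 ∨ p.1 = p.2 + 1)))

lemma violFrom_cons (L : List (Int × Int)) (i j : Int) (rest : List (Int × Int)) :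
    ViolFrom L ((i, j) :: rest) ↔
      (((j, i) ∈ L ∨ ((i, j) ∈ L ∧ (i = j - 1 ∨ i = j + 1))) ∨ ViolFrom (L ++ [(i, j)]) rest) := by
  constructor
  · rintro ⟨l, p, r, heq, hbad⟩
    cases l with
    | nil =>
      simp only [List.nil_append, List.cons.injEq] at heq
      obtain ⟨hp, -⟩ := heq
      subst hp
      left
      simpa using hbad
    | cons a l' =>
      simp only [List.cons_append, List.cons.injEq] at heq
      obtain ⟨ha, hrest⟩ := heq
      subst ha
      right
      refine ⟨l', p, r, hrest, ?_⟩
      rw [List.append_cons] at hbad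
      exact hbad
  · rintro (h | ⟨l, p, r, heq, hbad⟩)
    · exact ⟨[], (i, j), rest, rfl, by simpa using h⟩
    · refine ⟨(i, j) :: l, p, r, by simp [heq], ?_⟩
      rw [List.append_cons]
      exact hbad

lemma auxA_false_iff (comb : List (Int × Int)) :
    ∀ L, (pvAValidAux comb (PySem.Set.ofList L) = false) ↔ ViolFrom L comb := by
  induction comb with
  | nil =>
    intro L
    constructor
    · intro h; simp [pvAValidAux] at h
    · rintro ⟨l, p, r, heq, -⟩; simp at heq
  | cons hd rest ih =>
    obtain ⟨i, j⟩ := hd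
    intro L
    have hc : ∀ x : Int × Int, (PySem.Set.contains (PySem.Set.ofList L) x = true) ↔ x ∈ L :=
      fun x => (PySem.Set.contains_iff _ _).trans (PySem.Set.mem_ofList L x)
    rw [violFrom_cons]
    simp only [pvAValidAux]
    rw [← PySem.Set.ofList_append_singleton]
    split_ifs with h1 h2 h3
    · exact iff_of_true rfl (Or.inl (Or.inl ((hc _).mp h1)))
    · exact iff_of_true rfl (Or.inl (Or.inr ⟨(hc _).mp h2, h3⟩))
    · rw [ih]
      have hhead : ¬((j, i) ∈ L ∨ ((i, j) ∈ L ∧ (i = j - 1 ∨ i = j + 1))) := by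
        rintro (h | ⟨-, hadj⟩)
        · exact h1 ((hc _).mpr h)
        · exact h3 hadj
      tauto
    · rw [ih]
      have hhead : ¬((j, i) ∈ L ∨ ((i, j) ∈ L ∧ (i = j - 1 ∨ i = j + 1))) := by
        rintro (h | ⟨h, -⟩)
        · exact h1 ((hc _).mpr h)
        · exact h2 ((hc _).mpr h)
      tauto

lemma two_mem {α : Type} {p q : α} {xs : List α} (hp : p ∈ xs) (hq : q ∈ xs) (hne : p ≠ q) :
    ∃ l x r, xs = l ++ x :: r ∧ ((x = p ∧ q ∈ l) ∨ (x = q ∧ p ∈ l)) := by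
  induction xs with
  | nil => cases hp
  | cons a t ih =>
    by_cases hap : a = p
    · subst hap
      have hqt : q ∈ t := by
        rcases List.mem_cons.mp hq with h | h
        · exact absurd h.symm hne
        · exact h
      obtain ⟨l1, r1, heq⟩ := List.append_of_mem hqt
      exact ⟨a :: l1, q, r1, by simp [heq], Or.inr ⟨rfl, List.mem_cons_self⟩⟩
    · by_cases haq : a = q
      · subst haq
        have hpt : p ∈ t := by
          rcases List.mem_cons.mp hp with h | h
          · exact absurd h.symm hap
          · exact h
        obtain ⟨l1, r1, heq⟩ := List.append_of_mem hpt
        exact ⟨a :: l1, p, r1, by simp [heq], Or.inl ⟨rfl, List.mem_cons_self⟩⟩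
      · have hp' : p ∈ t := by
          rcases List.mem_cons.mp hp with h | h
          · exact absurd h.symm hap
          · exact h
        have hq' : q ∈ t := by
          rcases List.mem_cons.mp hq with h | h
          · exact absurd h.symm haq
          · exact h
        obtain ⟨l, x, r, heq, hcase⟩ := ih hp' hq'
        refine ⟨a :: l, x, r, by simp [heq], ?_⟩
        rcases hcase with ⟨hx, hm⟩ | ⟨hx, hm⟩
        · exact Or.inl ⟨hx, List.mem_cons_of_mem _ hm⟩
        · exact Or.inr ⟨hx, List.mem_cons_of_mem _ hm⟩

lemma count_two_split {α : Type} [BEq α] [LawfulBEq α] {p : α} {xs : List α}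
    (h : 2 ≤ xs.count p) : ∃ l r, xs = l ++ p :: r ∧ p ∈ l := by
  induction xs with
  | nil => simp at h
  | cons a t ih =>
    by_cases hap : a = p
    · subst hap
      rw [List.count_cons_self] at h
      have hpt : a ∈ t := List.count_pos_iff.mp (by omega)
      obtain ⟨l1, r1, heq⟩ := List.append_of_mem hpt
      exact ⟨a :: l1, r1, by simp [heq], List.mem_cons_self⟩
    · have ht : 2 ≤ t.count p := by
        rwa [List.count_cons_of_ne hap] at h
      obtain ⟨l, r, heq, hm⟩ := ih ht
      exact ⟨a :: l, r, by simp [heq], List.mem_cons_of_mem _ hm⟩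

lemma count_ge_two_of_split {p : Int × Int} {l r : List (Int × Int)} (h : p ∈ l) :
    2 ≤ ((l ++ p :: r).count p) := by
  have h1 : 0 < l.count p := List.count_pos_iff.mpr h
  simp only [List.count_append, List.count_cons_self]
  omega

lemma violFrom_nil_iff (comb : List (Int × Int)) : ViolFrom [] comb ↔ Viol comb := by
  constructor
  · rintro ⟨l, ⟨i, j⟩, r, heq, hbad⟩
    subst heq
    simp only [List.nil_append] at hbad
    have hmem : ((i, j) : Int × Int) ∈ l ++ (i, j) :: r :=
      List.mem_append_right _ List.mem_cons_self
    rcases hbad with hrev | ⟨hdup, hadj⟩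
    · by_cases hij : i = j
      · subst hij
        refine ⟨(i, i), hmem, Or.inr ⟨count_ge_two_of_split hrev, Or.inl rfl⟩⟩
      · exact ⟨(i, j), hmem, Or.inl ⟨hij, List.mem_append_left _ hrev⟩⟩
    · exact ⟨(i, j), hmem, Or.inr ⟨count_ge_two_of_split hdup, Or.inr hadj⟩⟩
  · rintro ⟨⟨i, j⟩, hmem, hbad⟩
    rcases hbad with ⟨hne, hrev⟩ | ⟨hcnt, hadj⟩
    · have hpq : ((i, j) : Int × Int) ≠ (j, i) := by
        intro h
        exact hne (congrArg Prod.fst h)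
      obtain ⟨l, x, r, heq, hcase⟩ := two_mem hmem hrev hpq
      rcases hcase with ⟨hx, hm⟩ | ⟨hx, hm⟩
      · subst hx
        exact ⟨l, (i, j), r, heq, Or.inl (by simpa using hm)⟩
      · subst hx
        exact ⟨l, (j, i), r, heq, Or.inl (by simpa using hm)⟩
    · obtain ⟨l, r, heq, hm⟩ := count_two_split hcnt
      rcases hadj with hij | hadj
      · refine ⟨l, (i, j), r, heq, Or.inl ?_⟩
        have hij' : i = j := by simpa using hij
        subst hij'
        simpa using hm
      · exact ⟨l, (i, j), r, heq, Or.inr ⟨by simpa using hm, hadj⟩⟩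

lemma A_false_iff (comb : List (Int × Int)) :
    (is_valid_combination_py comb = false) ↔ Viol comb := by
  have h0 : (PySem.Set.empty : PySem.Set (Int × Int)) = PySem.Set.ofList [] := rfl
  unfold is_valid_combination_py
  rw [h0, auxA_false_iff, violFrom_nil_iff]

lemma scan_false_iff (counts : PySem.Dict (Int × Int) Int) (items : List ((Int × Int) × Int)) :
    (pvBScan counts items = false) ↔
      ∃ e ∈ items, (e.1.1 ≠ e.1.2 ∧ counts.contains (e.1.2, e.1.1) = true) ∨
        (2 ≤ e.2 ∧ (e.1.1 = e.1.2 ∨ (e.1.1 - e.1.2).natAbs = 1)) := by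
  induction items with
  | nil => simp [pvBScan]
  | cons e rest ih =>
    obtain ⟨⟨i, j⟩, c⟩ := e
    simp only [pvBScan]
    split_ifs with h1 h2
    · exact iff_of_true rfl ⟨((i, j), c), List.mem_cons_self, Or.inl h1⟩
    · exact iff_of_true rfl ⟨((i, j), c), List.mem_cons_self, Or.inr h2⟩
    · rw [ih]
      constructor
      · rintro ⟨e, he, hc⟩
        exact ⟨e, List.mem_cons_of_mem _ he, hc⟩
      · rintro ⟨e, he, hc⟩
        rcases List.mem_cons.mp he with h | h
        · subst h
          rcases hc with hc | hc
          · exact absurd hc h1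
          · exact absurd hc h2
        · exact ⟨e, h, hc⟩

lemma B_false_iff (comb : List (Int × Int)) :
    (is_valid_combination_py_alt comb = false) ↔ Viol comb := by
  unfold is_valid_combination_py_alt
  simp only
  rw [PySem.Dict.foldl_insert_getD_add_one_eq_counter, scan_false_iff,
    PySem.Dict.items_counter]
  constructor
  · rintro ⟨e, he, hc⟩
    rw [List.mem_map] at he
    obtain ⟨⟨i, j⟩, hk, hek⟩ := he
    subst hek
    rw [PySem.Set.mem_ofList] at hk
    simp only at hc
    rcases hc with ⟨hne, hrev⟩ | ⟨hcnt, hadj⟩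
    · rw [PySem.Dict.contains_counter] at hrev
      exact ⟨(i, j), hk, Or.inl ⟨hne, by simpa using hrev⟩⟩
    · refine ⟨(i, j), hk, Or.inr ⟨by exact_mod_cast hcnt, ?_⟩⟩
      rcases hadj with h | h
      · exact Or.inl h
      · right; omega
  · rintro ⟨⟨i, j⟩, hmem, hc⟩
    refine ⟨((i, j), (comb.count (i, j) : Int)), ?_, ?_⟩
    · rw [List.mem_map]
      exact ⟨(i, j), (PySem.Set.mem_ofList comb (i, j)).mpr hmem, rfl⟩
    · dsimp only at hc ⊢
      rcases hc with ⟨hne, hrev⟩ | ⟨hcnt, hadj⟩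
      · refine Or.inl ⟨hne, ?_⟩
        rw [PySem.Dict.contains_counter]
        simpa using hrev
      · refine Or.inr ⟨by exact_mod_cast hcnt, ?_⟩
        rcases hadj with h | h | h
        · exact Or.inl h
        · right; omega
        · right; omega

-- ===== VERDICT (by name: the statement is the Claim_ definition above) =====
theorem is_valid_combination_py_spec : Claim_equal_is_valid_combination_py := by
  intro comb _
  unfold Spec_is_valid_combination_py
  have h := (A_false_iff comb).trans (B_false_iff comb).symm
  cases hA : is_valid_combination_py comb <;> cases hB : is_valid_combination_py_alt comb <;>
    simp_all
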